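-- pv_equiv track=rewrite | github.com/gargajit/dsa_problems | intermediate/closest_minmax.py | solve
-- ===== SOURCE A (Python) =====
-- def solve(A):
--     N = len(A)
--     min_val = min(A)
--     max_val = max(A)
--
--     if min_val == max_val:
--         return 1
--
--     last_min_index = -1
--     last_max_index = -1
--     min_length = N
--
--     for i in range(N):
--         if A[i] == min_val:
--             last_min_index = i
--             if last_max_index != -1:
--                 min_length = min(min_length, i - last_max_index + 1)
--
--         if A[i] == max_val:
--             last_max_index = i
--             if last_min_index != -1:
--                 min_length = min(min_length, i - last_min_index + 1)
--
--     return min_length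
-- ===== SOURCE B (Python) =====
-- def solve(A):
--     min_val = min(A)
--     max_val = max(A)
--     if min_val == max_val:
--         return 1
--     min_pos = [i for i, x in enumerate(A) if x == min_val]
--     max_pos = [i for i, x in enumerate(A) if x == max_val]
--     best = len(A)
--     i = 0
--     j = 0
--     while i < len(min_pos) and j < len(max_pos):
--         p = min_pos[i]
--         q = max_pos[j]
--         g = q - p if p <= q else p - q
--         if g < best:
--             best = g
--         if p < q:
--             i += 1
--         else:
--             j += 1
--     return best + 1
-- ===== Notes on version B (the rewrite author's own statement) =====
-- stated objective: alternative
-- what changed: Replaces A's single pass with inline last-min/last-max index tracking by a different decomposition: build the two sorted position lists of the minimum and the maximum, then run a two-pointer merge over them tracking the smallest cross gap.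
import Mathlib
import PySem

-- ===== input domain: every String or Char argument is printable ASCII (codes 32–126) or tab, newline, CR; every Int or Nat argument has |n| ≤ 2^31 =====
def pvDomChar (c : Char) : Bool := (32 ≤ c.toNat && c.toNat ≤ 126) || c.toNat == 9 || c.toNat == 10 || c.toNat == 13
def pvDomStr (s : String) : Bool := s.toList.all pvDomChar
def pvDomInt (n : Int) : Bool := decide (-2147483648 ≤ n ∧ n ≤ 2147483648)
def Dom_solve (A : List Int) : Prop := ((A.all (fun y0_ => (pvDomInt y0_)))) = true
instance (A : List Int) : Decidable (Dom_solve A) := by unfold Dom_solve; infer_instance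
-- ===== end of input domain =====

-- B replaces A's inline last-index tracking by an index-table-then-two-pointer-merge decomposition
-- (build the sorted position lists of the min and the max, then merge them tracking the smallest gap);
-- same O(n) cost, objective: alternative.

-- ===== PORT A =====
def solve (A : List Int) : Int :=
  let N : Int := PySem.List.len A
  let min_val : Int := (PySem.List.min? A (fun x => x)).getD 0
  let max_val : Int := (PySem.List.max? A (fun x => x)).getD 0
  if min_val = max_val then 1
  else
    let st := (PySem.List.pyRange 0 N 1).foldl
      (fun (st : Int × Int × Int) i =>
        let x := PySem.List.pyGetD A i 0
        let st1 := if x = min_val then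
            (i, st.2.1, if st.2.1 ≠ -1 then min st.2.2 (i - st.2.1 + 1) else st.2.2)
          else st
        if x = max_val then
          (st1.1, i, if st1.1 ≠ -1 then min st1.2.2 (i - st1.1 + 1) else st1.2.2)
        else st1)
      (-1, -1, N)
    st.2.2

-- ===== PORT B =====
-- the two-pointer merge over the two (sorted) position lists, tracking the smallest gap
def tpGo : List Int → List Int → Int → Int
  | p :: ps, q :: qs, best =>
    let g := if p ≤ q then q - p else p - q
    let best1 := if g < best then g else best
    if p < q then tpGo ps (q :: qs) best1 else tpGo (p :: ps) qs best1
  | _, _, best => best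
termination_by ps qs _ => ps.length + qs.length

def solve_alt (A : List Int) : Int :=
  let min_val : Int := (PySem.List.min? A (fun x => x)).getD 0
  let max_val : Int := (PySem.List.max? A (fun x => x)).getD 0
  if min_val = max_val then 1
  else
    let minPos := (PySem.List.enumerate A).filterMap
      (fun p => if p.2 = min_val then some p.1 else none)
    let maxPos := (PySem.List.enumerate A).filterMap
      (fun p => if p.2 = max_val then some p.1 else none)
    tpGo minPos maxPos (PySem.List.len A) + 1

-- ===== PRECONDITION & SPEC =====
-- Pre_ excludes only the empty list, on which Python's min(A) raises ValueError.
def Pre_solve (A : List Int) : Prop := A ≠ []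
instance (A : List Int) : Decidable (Pre_solve A) := by unfold Pre_solve; infer_instance
def pvWitness_solve : List Int := ([1, 3, 2])

def Spec_solve (A : List Int) (out : Int) : Prop := out = solve_alt A
instance (A : List Int) (out : Int) : Decidable (Spec_solve A out) := by unfold Spec_solve; infer_instance

-- ===== CLAIM (what is proved, stated in full; the proofs are below) =====
def Claim_equal_solve : Prop := ∀ (A : List Int), Dom_solve A → Pre_solve A → Spec_solve A (solve A)

-- ===== LEMMAS AND PROOFS =====

-- the gap |p - q| between a min-position p and a max-position q, as both ports compute it
def gap (p q : Int) : Int := if p ≤ q then q - p else p - q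

-- all cross gaps between the two position lists
def gaps (P Q : List Int) : List Int := P.flatMap (fun p => Q.map (fun q => gap p q))

-- running minimum with initial value b
def mns (l : List Int) (b : Int) : Int := l.foldl min b

-- positions of value v in l, indices starting at s
def posOf (v : Int) (l : List Int) (s : Int) : List Int :=
  (PySem.List.enumerate l s).filterMap (fun p => if p.2 = v then some p.1 else none)

-- A's loop body, as a function of the index/element pair
def stepA (mv Mv : Int) (st : Int × Int × Int) (i x : Int) : Int × Int × Int :=
  let st1 := if x = mv then
      (i, st.2.1, if st.2.1 ≠ -1 then min st.2.2 (i - st.2.1 + 1) else st.2.2)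
    else st
  if x = Mv then
    (st1.1, i, if st1.1 ≠ -1 then min st1.2.2 (i - st1.1 + 1) else st1.2.2)
  else st1

lemma mns_nil (b : Int) : mns [] b = b := rfl
lemma mns_cons (a : Int) (l : List Int) (b : Int) : mns (a :: l) b = mns l (min b a) := rfl
lemma mns_append (X Y : List Int) (b : Int) : mns (X ++ Y) b = mns Y (mns X b) :=
  List.foldl_append
lemma mns_snoc (X : List Int) (y b : Int) : mns (X ++ [y]) b = min (mns X b) y := by
  rw [mns_append, mns_cons, mns_nil]

lemma gaps_cons (p : Int) (P Q : List Int) :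
    gaps (p :: P) Q = Q.map (fun q => gap p q) ++ gaps P Q := by simp [gaps]
lemma gaps_nil_right (P : List Int) : gaps P [] = [] := by simp [gaps]

lemma mns_le (l : List Int) (b : Int) : mns l b ≤ b := by
  induction l generalizing b with
  | nil => simp [mns_nil]
  | cons a l ih => exact le_trans (ih (min b a)) (min_le_left _ _)

lemma mns_of_le (l : List Int) (b : Int) (h : ∀ x ∈ l, b ≤ x) : mns l b = b := by
  induction l with
  | nil => rfl
  | cons a l ih =>
    rw [mns_cons, min_eq_left (h a (by simp))]
    exact ih (fun x hx => h x (by simp [hx]))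

lemma mns_min_left (l : List Int) (b y : Int) : mns l (min b y) = min (mns l b) y := by
  induction l generalizing b with
  | nil => rfl
  | cons a l ih => rw [mns_cons, min_right_comm, ih, mns_cons]

lemma mns_init_switch (l : List Int) (b c g : Int) (hg : g ∈ l) (hb : g ≤ b) (hc : g ≤ c) :
    mns l b = mns l c := by
  induction l generalizing b c with
  | nil => cases hg
  | cons a l ih =>
    rw [mns_cons, mns_cons]
    rcases List.mem_cons.mp hg with rfl | hgl
    · rw [min_eq_right hb, min_eq_right hc]
    · by_cases hab : a ≤ b ∧ a ≤ c
      · rw [min_eq_right hab.1, min_eq_right hab.2]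
      · have hga : g < a := by rcases not_and_or.mp hab with h | h <;> omega
        exact ih (min b a) (min c a) hgl (by omega) (by omega)

lemma getLastD_mem (l : List Int) (h : l ≠ []) (d : Int) : l.getLastD d ∈ l := by
  induction l generalizing d with
  | nil => exact absurd rfl h
  | cons a t ih =>
    rw [List.getLastD_cons]
    rcases eq_or_ne t [] with rfl | ht
    · simp [List.getLastD]
    · exact List.mem_cons_of_mem _ (ih ht a)

lemma getLastD_indep (l : List Int) (h : l ≠ []) (d d' : Int) : l.getLastD d = l.getLastD d' := by
  cases l with
  | nil => exact absurd rfl h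
  | cons a t => rw [List.getLastD_cons, List.getLastD_cons]

lemma mns_map_sub (l : List Int) (s : Int) (h : l.Pairwise (· ≤ ·)) (hne : l ≠ []) :
    ∀ c, mns (l.map (fun q => s - q)) c = min c (s - l.getLastD 0) := by
  induction l with
  | nil => exact absurd rfl hne
  | cons a t ih =>
    intro c
    rw [List.map_cons, mns_cons, List.getLastD_cons]
    rcases eq_or_ne t [] with rfl | ht
    · simp [mns_nil, List.getLastD]
    · rw [ih h.tail ht (min c (s - a)), getLastD_indep t ht a 0]
      have hat : a ≤ t.getLastD 0 := (List.pairwise_cons.mp h).1 _ (getLastD_mem t ht 0)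
      omega

lemma mns_gaps_snoc_left (P Q : List Int) (k c : Int) :
    mns (gaps (P ++ [k]) Q) c = mns (Q.map (fun q => gap k q)) (mns (gaps P Q) c) := by
  simp only [gaps, List.flatMap_append, List.flatMap_cons, List.flatMap_nil, List.append_nil]
  exact mns_append _ _ _

lemma mns_gaps_snoc_right (P Q : List Int) (k : Int) :
    ∀ c, mns (gaps P (Q ++ [k])) c = mns (P.map (fun p => gap p k)) (mns (gaps P Q) c) := by
  induction P with
  | nil => intro c; simp [gaps, mns_nil]
  | cons p P ih =>
    intro c
    rw [gaps_cons, mns_append, List.map_append]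
    simp only [List.map_cons, List.map_nil]
    rw [mns_snoc, ih, gaps_cons, mns_append, mns_cons, mns_min_left, mns_min_left]

lemma drop_col (q : Int) (qs : List Int) : ∀ (P : List Int) (c : Int),
    (∀ p' ∈ P, c ≤ gap p' q) → mns (gaps P (q :: qs)) c = mns (gaps P qs) c := by
  intro P
  induction P with
  | nil => intro c _; rfl
  | cons p' P ih =>
    intro c h
    rw [gaps_cons, mns_append, List.map_cons, mns_cons,
      min_eq_left (h p' (List.mem_cons_self)),
      ih _ (fun p'' hp => le_trans (mns_le _ _) (h p'' (List.mem_cons_of_mem _ hp))),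
      gaps_cons, mns_append]

lemma tpGo_eq : ∀ (n : Nat) (ps qs : List Int) (b : Int), ps.length + qs.length ≤ n →
    ps.Pairwise (· ≤ ·) → qs.Pairwise (· ≤ ·) → tpGo ps qs b = mns (gaps ps qs) b := by
  intro n
  induction n with
  | zero =>
    intro ps qs b hlen _ _
    have hps : ps = [] := by cases ps <;> simp_all
    subst hps
    simp [tpGo, gaps, mns_nil]
  | succ n ih =>
    intro ps qs b hlen hps hqs
    cases ps with
    | nil => simp [tpGo, gaps, mns_nil]
    | cons p ps' =>
      cases qs with
      | nil => simp [tpGo, gaps_nil_right, mns_nil]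
      | cons q qs' =>
        rw [tpGo]
        have hbest : (if (if p ≤ q then q - p else p - q) < b then (if p ≤ q then q - p else p - q) else b)
            = min b (gap p q) := by unfold gap; split_ifs <;> omega
        simp only [hbest]
        by_cases hpq : p < q
        · rw [if_pos hpq, ih ps' (q :: qs') (min b (gap p q)) (by simp only [List.length_cons] at hlen ⊢; omega) hps.tail hqs,
            gaps_cons, mns_append, List.map_cons, mns_cons]
          have hin : mns (List.map (fun q' => gap p q') qs') (min b (gap p q)) = min b (gap p q) := by
            refine mns_of_le _ _ ?_
            intro y hy
            obtain ⟨q', hq', rfl⟩ := List.mem_map.mp hy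
            have hqq' : q ≤ q' := (List.pairwise_cons.mp hqs).1 q' hq'
            unfold gap; split_ifs <;> omega
          rw [hin]
        · have hcond : ∀ p'' ∈ ps',
              mns (List.map (fun q' => gap p q') qs') (min b (gap p q)) ≤ gap p'' q := by
            intro p'' hp
            have hpp : p ≤ p'' := (List.pairwise_cons.mp hps).1 p'' hp
            have h1 : mns (List.map (fun q' => gap p q') qs') (min b (gap p q)) ≤ gap p q :=
              le_trans (mns_le _ _) (min_le_right _ _)
            have h2 : gap p q ≤ gap p'' q := by unfold gap; split_ifs <;> omega
            omega
          have hR : mns (gaps (p :: ps') (q :: qs')) b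
              = mns (gaps (p :: ps') qs') (min b (gap p q)) := by
            rw [gaps_cons, mns_append, List.map_cons, mns_cons, drop_col q qs' ps' _ hcond,
              gaps_cons p ps' qs', mns_append]
          rw [if_neg hpq,
            ih (p :: ps') qs' (min b (gap p q)) (by simp only [List.length_cons] at hlen ⊢; omega)
              hps hqs.tail, hR]

lemma posOf_cons (v x : Int) (l : List Int) (s : Int) :
    posOf v (x :: l) s = (if x = v then [s] else []) ++ posOf v l (s + 1) := by
  simp only [posOf, PySem.List.enumerate_cons, List.filterMap_cons]
  split_ifs <;> simp_all

lemma mem_posOf (v : Int) (l : List Int) (s x : Int) (hx : x ∈ posOf v l s) :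
    s ≤ x ∧ x < s + l.length := by
  simp only [posOf, List.mem_filterMap] at hx
  obtain ⟨p, hp, hpx⟩ := hx
  rw [PySem.List.mem_enumerate_iff] at hp
  obtain ⟨k, hk, rfl⟩ := hp
  by_cases h : (l[k] = v) <;> simp [h] at hpx
  omega

lemma posOf_sorted (v : Int) (l : List Int) (s : Int) : (posOf v l s).Pairwise (· ≤ ·) := by
  refine List.Pairwise.filterMap _ ?_ (PySem.List.pairwise_lt_enumerate l s)
  intro a a' h b hb b' hb'
  by_cases h2 : (a.2 = v) <;> simp [h2] at hb
  by_cases h2' : (a'.2 = v) <;> simp [h2'] at hb'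
  omega

lemma posOf_ne_nil (v : Int) (l : List Int) (s : Int) (h : v ∈ l) : posOf v l s ≠ [] := by
  induction l generalizing s with
  | nil => cases h
  | cons a l ih =>
    rw [posOf_cons]
    rcases List.mem_cons.mp h with h | h
    · simp [h.symm]
    · intro hc
      rcases List.append_eq_nil_iff.mp hc with ⟨-, h2⟩
      exact ih (s + 1) h h2

lemma loopA (mv Mv : Int) (hne : mv ≠ Mv) (N : Int) :
    ∀ (l : List Int) (s : Int) (P Q : List Int), 0 ≤ s →
    P.Pairwise (· ≤ ·) → Q.Pairwise (· ≤ ·) →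
    (∀ x ∈ P, 0 ≤ x ∧ x < s) → (∀ x ∈ Q, 0 ≤ x ∧ x < s) →
    (PySem.List.enumerate l s).foldl (fun st p => stepA mv Mv st p.1 p.2)
        (P.getLastD (-1), Q.getLastD (-1), mns (gaps P Q) (N - 1) + 1)
      = ((P ++ posOf mv l s).getLastD (-1), (Q ++ posOf Mv l s).getLastD (-1),
         mns (gaps (P ++ posOf mv l s) (Q ++ posOf Mv l s)) (N - 1) + 1) := by
  intro l
  induction l with
  | nil =>
    intro s P Q hs hP hQ bP bQ
    simp [posOf, PySem.List.enumerate_nil]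
  | cons x l ih =>
    intro s P Q hs hP hQ bP bQ
    rw [PySem.List.enumerate_cons, List.foldl_cons]
    by_cases hx1 : x = mv
    · have hx2 : ¬ x = Mv := by rw [hx1]; exact hne
      have hT : stepA mv Mv (P.getLastD (-1), Q.getLastD (-1), mns (gaps P Q) (N - 1) + 1)
            ((s, x) : Int × Int).1 ((s, x) : Int × Int).2
          = ((P ++ [s]).getLastD (-1), Q.getLastD (-1), mns (gaps (P ++ [s]) Q) (N - 1) + 1) := by
        simp only [stepA, if_pos hx1, if_neg hx2, List.getLastD_concat]
        rw [mns_gaps_snoc_left]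
        rcases eq_or_ne Q [] with rfl | hQne
        · simp [mns_nil, List.getLastD]
        · have hmem := getLastD_mem Q hQne (-1)
          have hbnd := bQ _ hmem
          have hmap : Q.map (fun q => gap s q) = Q.map (fun q => s - q) :=
            List.map_congr_left (fun q hq => by
              have := bQ q hq; unfold gap; split_ifs <;> omega)
          rw [hmap, mns_map_sub Q s hQ hQne, getLastD_indep Q hQne 0 (-1)]
          rw [if_pos (by omega)]
          have := mns_le (gaps P Q) (N - 1)
          simp only [Prod.mk.injEq, true_and]
          omega
      rw [hT, ih (s + 1) (P ++ [s]) Q (by omega)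
        (List.pairwise_append.mpr ⟨hP, List.pairwise_singleton _ _,
          fun a ha b hb => by rw [List.mem_singleton.mp hb]; exact le_of_lt (bP a ha).2⟩)
        hQ
        (fun y hy => by
          rcases List.mem_append.mp hy with h | h
          · have := bP y h; omega
          · rw [List.mem_singleton.mp h]; omega)
        (fun y hy => by have := bQ y hy; omega)]
      rw [posOf_cons mv x l s, posOf_cons Mv x l s, if_pos hx1, if_neg hx2]
      simp only [List.nil_append, List.append_assoc, List.singleton_append]
    · by_cases hx2 : x = Mv
      · have hT : stepA mv Mv (P.getLastD (-1), Q.getLastD (-1), mns (gaps P Q) (N - 1) + 1)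
              ((s, x) : Int × Int).1 ((s, x) : Int × Int).2
            = (P.getLastD (-1), (Q ++ [s]).getLastD (-1),
               mns (gaps P (Q ++ [s])) (N - 1) + 1) := by
          simp only [stepA, if_neg hx1, if_pos hx2, List.getLastD_concat]
          rw [mns_gaps_snoc_right]
          rcases eq_or_ne P [] with rfl | hPne
          · simp [mns_nil, List.getLastD]
          · have hmem := getLastD_mem P hPne (-1)
            have hbnd := bP _ hmem
            have hmap : P.map (fun p => gap p s) = P.map (fun p => s - p) :=
              List.map_congr_left (fun p hp => by
                have := bP p hp; unfold gap; split_ifs <;> omega)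
            rw [hmap, mns_map_sub P s hP hPne, getLastD_indep P hPne 0 (-1)]
            rw [if_pos (by omega)]
            have := mns_le (gaps P Q) (N - 1)
            simp only [Prod.mk.injEq, true_and]
            omega
        rw [hT, ih (s + 1) P (Q ++ [s]) (by omega)
          hP
          (List.pairwise_append.mpr ⟨hQ, List.pairwise_singleton _ _,
            fun a ha b hb => by rw [List.mem_singleton.mp hb]; exact le_of_lt (bQ a ha).2⟩)
          (fun y hy => by have := bP y hy; omega)
          (fun y hy => by
            rcases List.mem_append.mp hy with h | h
            · have := bQ y h; omega
            · rw [List.mem_singleton.mp h]; omega)]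
        rw [posOf_cons mv x l s, posOf_cons Mv x l s, if_neg hx1, if_pos hx2]
        simp only [List.nil_append, List.append_assoc, List.singleton_append]
      · have hT : stepA mv Mv (P.getLastD (-1), Q.getLastD (-1), mns (gaps P Q) (N - 1) + 1)
              ((s, x) : Int × Int).1 ((s, x) : Int × Int).2
            = (P.getLastD (-1), Q.getLastD (-1), mns (gaps P Q) (N - 1) + 1) := by
          simp only [stepA, if_neg hx1, if_neg hx2]
        rw [hT, ih (s + 1) P Q (by omega) hP hQ
          (fun y hy => by have := bP y hy; omega)
          (fun y hy => by have := bQ y hy; omega)]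
        rw [posOf_cons mv x l s, posOf_cons Mv x l s, if_neg hx1, if_neg hx2]
        simp only [List.nil_append]

-- ===== VERDICT (by name: the statement is the Claim_ definition above) =====
theorem solve_spec : Claim_equal_solve := by
  intro A hdom hpre
  unfold Spec_solve
  obtain ⟨m, hm⟩ : ∃ m, PySem.List.min? A (fun x => x) = some m := by
    cases h : PySem.List.min? A (fun x => x) with
    | none => exact absurd ((PySem.List.min?_eq_none_iff A (fun x => x)).mp h) hpre
    | some m => exact ⟨m, rfl⟩
  obtain ⟨M, hM⟩ : ∃ M, PySem.List.max? A (fun x => x) = some M := by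
    cases h : PySem.List.max? A (fun x => x) with
    | none => exact absurd ((PySem.List.max?_eq_none_iff A (fun x => x)).mp h) hpre
    | some M => exact ⟨M, rfl⟩
  by_cases hmM : m = M
  · simp [solve, solve_alt, hm, hM, hmM]
  · -- nonempty position lists and a witness gap bounded by len A - 1
    have hmA : m ∈ A := PySem.List.min?_mem hm
    have hMA : M ∈ A := PySem.List.max?_mem hM
    obtain ⟨p0, hp0⟩ := List.exists_mem_of_ne_nil _ (posOf_ne_nil m A 0 hmA)
    obtain ⟨q0, hq0⟩ := List.exists_mem_of_ne_nil _ (posOf_ne_nil M A 0 hMA)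
    have hbp := mem_posOf m A 0 p0 hp0
    have hbq := mem_posOf M A 0 q0 hq0
    have hgmem : gap p0 q0 ∈ gaps (posOf m A 0) (posOf M A 0) :=
      List.mem_flatMap.mpr ⟨p0, hp0, List.mem_map_of_mem hq0⟩
    have hgle : gap p0 q0 ≤ PySem.List.len A - 1 := by
      rw [PySem.List.len_eq]; unfold gap; split_ifs <;> omega
    have hswitch : mns (gaps (posOf m A 0) (posOf M A 0)) (PySem.List.len A - 1)
        = mns (gaps (posOf m A 0) (posOf M A 0)) (PySem.List.len A) :=
      mns_init_switch _ _ _ _ hgmem hgle (by omega)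
    have hB : solve_alt A
        = mns (gaps (posOf m A 0) (posOf M A 0)) (PySem.List.len A) + 1 := by
      simp only [solve_alt, hm, hM, Option.getD_some, if_neg hmM]
      change tpGo (posOf m A 0) (posOf M A 0) (PySem.List.len A) + 1 = _
      rw [tpGo_eq ((posOf m A 0).length + (posOf M A 0).length) _ _ _ le_rfl
        (posOf_sorted m A 0) (posOf_sorted M A 0)]
    have hA : solve A
        = mns (gaps (posOf m A 0) (posOf M A 0)) (PySem.List.len A - 1) + 1 := by
      simp only [solve, hm, hM, Option.getD_some, if_neg hmM]
      have hfold : (PySem.List.pyRange 0 (PySem.List.len A) 1).foldl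
            (fun (st : Int × Int × Int) i =>
              let x := PySem.List.pyGetD A i 0
              let st1 := if x = m then
                  (i, st.2.1, if st.2.1 ≠ -1 then min st.2.2 (i - st.2.1 + 1) else st.2.2)
                else st
              if x = M then
                (st1.1, i, if st1.1 ≠ -1 then min st1.2.2 (i - st1.1 + 1) else st1.2.2)
              else st1)
            (-1, -1, PySem.List.len A)
          = (PySem.List.enumerate A).foldl (fun st p => stepA m M st p.1 p.2)
            (-1, -1, PySem.List.len A) := by
        rw [PySem.List.enumerate_eq_map_pyRange A 0, List.foldl_map]
        rfl
      rw [hfold]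
      have hinit : ((-1 : Int), (-1 : Int), PySem.List.len A)
          = (([] : List Int).getLastD (-1), ([] : List Int).getLastD (-1),
             mns (gaps ([] : List Int) ([] : List Int)) (PySem.List.len A - 1) + 1) := by
        simp only [List.getLastD, gaps, List.flatMap_nil, mns_nil, Prod.mk.injEq, true_and]
        omega
      rw [hinit, loopA m M hmM (PySem.List.len A) A 0 [] [] le_rfl
        List.Pairwise.nil List.Pairwise.nil (by simp) (by simp)]
      simp only [List.nil_append]
    rw [hA, hB, hswitch]
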